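-- pv_equiv track=rewrite | github.com/emersoncrim-rgb/rics-retirement-dashboard | ingest.py | validate_cashflow
-- ===== SOURCE A (Python) =====
-- def validate_cashflow(rows: list[dict]) -> list[str]:
--     flags: list[str] = []
--     if not rows:
--         flags.append("CF_EMPTY: cashflow plan is empty")
--         return flags
--     categories = {r["category"] for r in rows}
--     if "income" not in categories:
--         flags.append("CF_NO_INCOME: no income rows found")
--     if "expense" not in categories:
--         flags.append("CF_NO_EXPENSE: no expense rows found")
--     # Check SS present
--     ss = [r for r in rows if r.get("subcategory") == "social_security"]
--     if not ss:
--         flags.append("CF_NO_SS: no social_security income row found")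
--     return flags
-- ===== SOURCE B (Python) =====
-- def validate_cashflow(rows: list[dict]) -> list[str]:
--     if not rows:
--         return ["CF_EMPTY: cashflow plan is empty"]
--     # Worklist of pending checks: each is (flag message, predicate that discharges it).
--     # A check is removed as soon as some row satisfies it; the scan stops early once
--     # no checks remain. Whatever is still pending at the end becomes the flags.
--     pending = [
--         ("CF_NO_INCOME: no income rows found",
--          lambda r: r["category"] == "income"),
--         ("CF_NO_EXPENSE: no expense rows found",
--          lambda r: r["category"] == "expense"),
--         ("CF_NO_SS: no social_security income row found",
--          lambda r: r.get("subcategory") == "social_security"),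
--     ]
--     for r in rows:
--         if not pending:
--             break
--         pending = [(msg, p) for (msg, p) in pending if not p(r)]
--     return [msg for (msg, _) in pending]
-- ===== Notes on version B (the rewrite author's own statement) =====
-- stated objective: alternative
-- what changed: Replaces A's set-of-categories plus filtered-list plus membership tests with a shrinking worklist of pending (flag, predicate) checks: each row discharges the checks it satisfies, the scan exits early once none remain, and the surviving messages are the flags.
import Mathlib
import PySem

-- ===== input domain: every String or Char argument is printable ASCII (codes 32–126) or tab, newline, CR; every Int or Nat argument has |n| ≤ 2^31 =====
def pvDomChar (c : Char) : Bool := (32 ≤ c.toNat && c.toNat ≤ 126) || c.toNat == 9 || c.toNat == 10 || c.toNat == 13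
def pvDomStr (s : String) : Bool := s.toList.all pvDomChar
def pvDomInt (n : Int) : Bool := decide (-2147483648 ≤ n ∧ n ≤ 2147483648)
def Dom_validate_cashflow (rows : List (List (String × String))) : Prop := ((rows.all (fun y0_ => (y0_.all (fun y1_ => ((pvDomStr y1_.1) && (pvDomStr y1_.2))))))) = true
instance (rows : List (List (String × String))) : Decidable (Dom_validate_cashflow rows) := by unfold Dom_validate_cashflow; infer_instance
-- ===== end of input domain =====

-- B replaces A's set comprehension + filtered list + membership tests with a shrinking
-- worklist of pending checks discharged row by row, with early exit (objective: alternative).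

-- ===== PORT A =====
-- dicts are association lists (lookup = first match); r["category"] is ported with a ""
-- default, which is only reached outside Pre_ (where the Python raises KeyError).
def pvLookup (r : List (String × String)) (k : String) : Option String :=
  List.lookup k r

def validate_cashflow (rows : List (List (String × String))) : List String :=
  if rows = [] then ["CF_EMPTY: cashflow plan is empty"]
  else
    let categories : PySem.Set String :=
      PySem.Set.ofList (rows.map (fun r => (pvLookup r "category").getD ""))
    let flags : List String :=
      (if PySem.Set.contains categories "income" then [] else ["CF_NO_INCOME: no income rows found"]) ++
      (if PySem.Set.contains categories "expense" then [] else ["CF_NO_EXPENSE: no expense rows found"])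
    let ss := rows.filter (fun r => pvLookup r "subcategory" == some "social_security")
    flags ++ (if ss.isEmpty then ["CF_NO_SS: no social_security income row found"] else [])

-- ===== PORT B =====
-- A pending check from B's worklist: its flag message and its discharging predicate
-- (the Python (msg, lambda) pair, ported as a tag with msg/pred functions).
inductive PvCheck | inc | exp | ss
deriving DecidableEq, Repr

def pvMsg : PvCheck → String
  | .inc => "CF_NO_INCOME: no income rows found"
  | .exp => "CF_NO_EXPENSE: no expense rows found"
  | .ss  => "CF_NO_SS: no social_security income row found"

-- r["category"] ported with a "" default, only reached outside Pre_ (KeyError in Python).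
def pvPred : PvCheck → List (String × String) → Bool
  | .inc, r => (List.lookup "category" r).getD "" == "income"
  | .exp, r => (List.lookup "category" r).getD "" == "expense"
  | .ss,  r => List.lookup "subcategory" r == some "social_security"

-- B's loop: each row filters the worklist; break as soon as it is empty.
def pvLoop : List PvCheck → List (List (String × String)) → List PvCheck
  | pending, [] => pending
  | pending, r :: rs =>
      if pending = [] then pending
      else pvLoop (pending.filter (fun c => !pvPred c r)) rs

def validate_cashflow_alt (rows : List (List (String × String))) : List String :=
  if rows = [] then ["CF_EMPTY: cashflow plan is empty"]
  else (pvLoop [PvCheck.inc, PvCheck.exp, PvCheck.ss] rows).map pvMsg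

-- ===== PRECONDITION & SPEC =====
-- Pre_ excludes exactly the inputs where some row has no "category" key: there the Python A
-- raises KeyError.
def Pre_validate_cashflow (rows : List (List (String × String))) : Prop :=
  ∀ r ∈ rows, (List.lookup "category" r).isSome
instance (rows : List (List (String × String))) : Decidable (Pre_validate_cashflow rows) := by
  unfold Pre_validate_cashflow; infer_instance

def pvWitness_validate_cashflow : (List (List (String × String))) :=
  [[("category", "income"), ("subcategory", "social_security")], [("category", "expense")]]

def Spec_validate_cashflow (rows : List (List (String × String))) (out : List String) : Prop := out = validate_cashflow_alt rows
instance (rows : List (List (String × String))) (out : List String) : Decidable (Spec_validate_cashflow rows out) := by unfold Spec_validate_cashflow; infer_instance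

-- ===== CLAIM =====
def Claim_equal_validate_cashflow : Prop := ∀ (rows : List (List (String × String))), Dom_validate_cashflow rows → Pre_validate_cashflow rows → Spec_validate_cashflow rows (validate_cashflow rows)

-- ===== LEMMAS AND PROOFS =====

-- The worklist loop keeps exactly the checks no row discharges (the early break is sound:
-- filtering an empty list is the empty list).
lemma pvLoop_filter (rows : List (List (String × String))) (pending : List PvCheck) :
    pvLoop pending rows = pending.filter (fun c => !rows.any (fun r => pvPred c r)) := by
  induction rows generalizing pending with
  | nil => simp [pvLoop]
  | cons r rs ih =>
    by_cases hp : pending = []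
    · simp [pvLoop, hp]
    · rw [pvLoop, if_neg hp, ih, List.filter_filter]
      exact List.filter_congr (fun c _ => by simp [List.any_cons, Bool.and_comm])

-- "s in categories" is a one-pass any over the rows.
lemma contains_any (rows : List (List (String × String))) (s : String) :
    PySem.Set.contains
        (PySem.Set.ofList (rows.map (fun r => (pvLookup r "category").getD ""))) s
      = rows.any (fun r => (List.lookup "category" r).getD "" == s) := by
  rw [Bool.eq_iff_iff, PySem.Set.contains_iff, PySem.Set.mem_ofList]
  simp [pvLookup, List.any_eq_true]

-- "not ss" for the filtered list is the negated any.
lemma isEmpty_filter (rows : List (List (String × String))) :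
    (rows.filter (fun r => pvLookup r "subcategory" == some "social_security")).isEmpty
      = !rows.any (fun r => List.lookup "subcategory" r == some "social_security") := by
  rw [Bool.eq_iff_iff]
  simp [List.isEmpty_iff, List.filter_eq_nil_iff, List.any_eq_false, pvLookup]

-- ===== VERDICT =====
theorem validate_cashflow_spec : Claim_equal_validate_cashflow := by
  intro rows _ _
  unfold Spec_validate_cashflow validate_cashflow validate_cashflow_alt
  by_cases hnil : rows = []
  · simp [hnil]
  · simp only [hnil, if_false, pvLoop_filter, contains_any, isEmpty_filter]
    rcases h1 : rows.any (fun r => (List.lookup "category" r).getD "" == "income") <;>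
    rcases h2 : rows.any (fun r => (List.lookup "category" r).getD "" == "expense") <;>
    rcases h3 : rows.any (fun r => List.lookup "subcategory" r == some "social_security") <;>
      simp [List.filter, pvPred, pvMsg, h1, h2, h3]
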